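-- pv_equiv track=rewrite | github.com/flight505/kokoro_tts_mlx | src/kokoro/processing/voice.py | list_voices
-- ===== SOURCE A (Python) =====
-- from typing import Literal
--
-- VOICES = {
--     # American English
--     "af_heart": "voices/af_heart.safetensors",
--     "af_bella": "voices/af_bella.safetensors",
--     "af_nova": "voices/af_nova.safetensors",
--     "af_sarah": "voices/af_sarah.safetensors",
--     "af_nicole": "voices/af_nicole.safetensors",
--     "af_sky": "voices/af_sky.safetensors",
--     "am_adam": "voices/am_adam.safetensors",
--     "am_michael": "voices/am_michael.safetensors",
--
--     # British English
--     "bf_emma": "voices/bf_emma.safetensors",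
--     "bf_isabella": "voices/bf_isabella.safetensors",
--     "bm_george": "voices/bm_george.safetensors",
--     "bm_lewis": "voices/bm_lewis.safetensors",
--
--     # Japanese
--     "jf_alpha": "voices/jf_alpha.safetensors",
--     "jf_gongitsune": "voices/jf_gongitsune.safetensors",
--     "jm_kumo": "voices/jm_kumo.safetensors",
--
--     # Chinese
--     "zf_xiaobei": "voices/zf_xiaobei.safetensors",
--     "zf_xiaoni": "voices/zf_xiaoni.safetensors",
--     "zf_xiaoxuan": "voices/zf_xiaoxuan.safetensors",
--     "zm_yunjian": "voices/zm_yunjian.safetensors",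
-- }
--
-- def list_voices(
--
--     lang: Literal["all", "en-us", "en-gb", "ja", "zh"] = "all"
-- ) -> list[str]:
--     """
--     List available voices.
--
--     Args:
--         lang: Filter by language
--
--     Returns:
--         List of voice names
--     """
--     if lang == "all":
--         return list(VOICES.keys())
--
--     prefix_map = {
--         "en-us": ["af_", "am_"],
--         "en-gb": ["bf_", "bm_"],
--         "ja": ["jf_", "jm_"],
--         "zh": ["zf_", "zm_"],
--     }
--
--     prefixes = prefix_map.get(lang, [])
--     return [v for v in VOICES.keys() if any(v.startswith(p) for p in prefixes)]
-- ===== SOURCE B (Python) =====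
-- from typing import Literal
--
-- VOICES = {
--     "af_heart": "voices/af_heart.safetensors",
--     "af_bella": "voices/af_bella.safetensors",
--     "af_nova": "voices/af_nova.safetensors",
--     "af_sarah": "voices/af_sarah.safetensors",
--     "af_nicole": "voices/af_nicole.safetensors",
--     "af_sky": "voices/af_sky.safetensors",
--     "am_adam": "voices/am_adam.safetensors",
--     "am_michael": "voices/am_michael.safetensors",
--     "bf_emma": "voices/bf_emma.safetensors",
--     "bf_isabella": "voices/bf_isabella.safetensors",
--     "bm_george": "voices/bm_george.safetensors",
--     "bm_lewis": "voices/bm_lewis.safetensors",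
--     "jf_alpha": "voices/jf_alpha.safetensors",
--     "jf_gongitsune": "voices/jf_gongitsune.safetensors",
--     "jm_kumo": "voices/jm_kumo.safetensors",
--     "zf_xiaobei": "voices/zf_xiaobei.safetensors",
--     "zf_xiaoni": "voices/zf_xiaoni.safetensors",
--     "zf_xiaoxuan": "voices/zf_xiaoxuan.safetensors",
--     "zm_yunjian": "voices/zm_yunjian.safetensors",
-- }
--
-- _LANG_OF_INITIAL = {"a": "en-us", "b": "en-gb", "j": "ja", "z": "zh"}
--
--
-- def list_voices(
--     lang: Literal["all", "en-us", "en-gb", "ja", "zh"] = "all"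
-- ) -> list[str]:
--     """List available voices, optionally filtered by language."""
--     if lang == "all":
--         return list(VOICES.keys())
--     groups: dict[str, list[str]] = {}
--     for v in VOICES:
--         l = _LANG_OF_INITIAL.get(v[0])
--         if l is not None:
--             groups.setdefault(l, []).append(v)
--     return groups.get(lang, [])
-- ===== Notes on version B (the rewrite author's own statement) =====
-- stated objective: simpler
-- what changed: B replaces A's per-voice scan over a language->prefix-list map (any(startswith) per voice) with a single grouping pass keyed by each voice name's first character into a language->names index, followed by one lookup groups.get(lang, []).
import Mathlib
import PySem

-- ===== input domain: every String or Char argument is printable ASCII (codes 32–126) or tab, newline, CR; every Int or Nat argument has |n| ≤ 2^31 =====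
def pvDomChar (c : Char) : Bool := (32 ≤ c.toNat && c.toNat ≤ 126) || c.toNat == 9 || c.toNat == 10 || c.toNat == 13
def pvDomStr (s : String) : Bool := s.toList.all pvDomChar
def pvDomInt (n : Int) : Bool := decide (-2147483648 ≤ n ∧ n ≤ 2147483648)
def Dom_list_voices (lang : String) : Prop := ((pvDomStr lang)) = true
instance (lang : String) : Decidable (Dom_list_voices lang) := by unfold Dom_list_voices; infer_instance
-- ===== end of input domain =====

-- B replaces A's per-voice prefix scanning with one grouping pass (index by first character) and a single lookup; simpler, same cost.

-- the module-level VOICES dict, shared context of both programs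
def pvVOICES : PySem.Dict String String := PySem.Dict.mk [
  ("af_heart", "voices/af_heart.safetensors"),
  ("af_bella", "voices/af_bella.safetensors"),
  ("af_nova", "voices/af_nova.safetensors"),
  ("af_sarah", "voices/af_sarah.safetensors"),
  ("af_nicole", "voices/af_nicole.safetensors"),
  ("af_sky", "voices/af_sky.safetensors"),
  ("am_adam", "voices/am_adam.safetensors"),
  ("am_michael", "voices/am_michael.safetensors"),
  ("bf_emma", "voices/bf_emma.safetensors"),
  ("bf_isabella", "voices/bf_isabella.safetensors"),
  ("bm_george", "voices/bm_george.safetensors"),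
  ("bm_lewis", "voices/bm_lewis.safetensors"),
  ("jf_alpha", "voices/jf_alpha.safetensors"),
  ("jf_gongitsune", "voices/jf_gongitsune.safetensors"),
  ("jm_kumo", "voices/jm_kumo.safetensors"),
  ("zf_xiaobei", "voices/zf_xiaobei.safetensors"),
  ("zf_xiaoni", "voices/zf_xiaoni.safetensors"),
  ("zf_xiaoxuan", "voices/zf_xiaoxuan.safetensors"),
  ("zm_yunjian", "voices/zm_yunjian.safetensors")]

-- ===== PORT A =====
def list_voices (lang : String) : List String :=
  if lang == "all" then pvVOICES.keys
  else
    let prefix_map : PySem.Dict String (List String) := PySem.Dict.mk [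
      ("en-us", ["af_", "am_"]),
      ("en-gb", ["bf_", "bm_"]),
      ("ja", ["jf_", "jm_"]),
      ("zh", ["zf_", "zm_"])]
    let prefixes := prefix_map.getD lang []
    pvVOICES.keys.filter (fun v => prefixes.any (fun p => PySem.Str.startswith v p))

-- ===== PORT B =====
-- Python's one-character strings "a".."z" are represented as Chars (v[0] : Char under PySem)
def pvLangOfInitial : PySem.Dict Char String := PySem.Dict.mk [
  ('a', "en-us"), ('b', "en-gb"), ('j', "ja"), ('z', "zh")]

def list_voices_alt (lang : String) : List String :=
  if lang == "all" then pvVOICES.keys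
  else
    -- for v in VOICES: l = _LANG_OF_INITIAL.get(v[0]); if l is not None: groups.setdefault(l, []).append(v)
    -- v[0] never raises here (every key of the fixed VOICES is nonempty), so the IndexError case maps to the impossible `none` branch
    let groups : PySem.Dict String (List String) :=
      pvVOICES.keys.foldl (fun g v =>
        match (PySem.Str.pyGet? v 0).bind (fun c => pvLangOfInitial.get? c) with
        | some l => g.modify l [] (fun xs => xs ++ [v])
        | none => g) PySem.Dict.empty
    groups.getD lang []

-- ===== PRECONDITION & SPEC =====
def Spec_list_voices (lang : String) (out : List String) : Prop := out = list_voices_alt lang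
instance (lang : String) (out : List String) : Decidable (Spec_list_voices lang out) := by unfold Spec_list_voices; infer_instance

-- ===== CLAIM (what is proved, stated in full; the proofs are below) =====
def Claim_equal_list_voices : Prop := ∀ (lang : String), Dom_list_voices lang → Spec_list_voices lang (list_voices lang)

-- ===== LEMMAS AND PROOFS =====

-- the grouping fold of B, evaluated on the fixed VOICES table (closed term, checked by the kernel)
theorem pv_alt_eq (lang : String) : list_voices_alt lang =
    if lang == "all" then pvVOICES.keys
    else PySem.Dict.getD (PySem.Dict.mk [
      ("en-us", ["af_heart", "af_bella", "af_nova", "af_sarah", "af_nicole", "af_sky", "am_adam", "am_michael"]),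
      ("en-gb", ["bf_emma", "bf_isabella", "bm_george", "bm_lewis"]),
      ("ja", ["jf_alpha", "jf_gongitsune", "jm_kumo"]),
      ("zh", ["zf_xiaobei", "zf_xiaoni", "zf_xiaoxuan", "zm_yunjian"])]) lang [] := by
  rfl

-- ===== VERDICT (by name: the statement is the Claim_ definition above) =====
theorem list_voices_spec : Claim_equal_list_voices := by
  intro lang _
  unfold Spec_list_voices
  by_cases h0 : lang = "all"
  · subst h0; decide
  by_cases h1 : lang = "en-us"
  · subst h1; decide
  by_cases h2 : lang = "en-gb"
  · subst h2; decide
  by_cases h3 : lang = "ja"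
  · subst h3; decide
  by_cases h4 : lang = "zh"
  · subst h4; decide
  -- lang matches no key: both programs return []
  have e0 : (lang == "all") = false := beq_eq_false_iff_ne.mpr h0
  have e1 : ("en-us" == lang) = false := beq_eq_false_iff_ne.mpr (Ne.symm h1)
  have e2 : ("en-gb" == lang) = false := beq_eq_false_iff_ne.mpr (Ne.symm h2)
  have e3 : ("ja" == lang) = false := beq_eq_false_iff_ne.mpr (Ne.symm h3)
  have e4 : ("zh" == lang) = false := beq_eq_false_iff_ne.mpr (Ne.symm h4)
  rw [pv_alt_eq]
  simp [list_voices, PySem.Dict.getD, PySem.Dict.get?,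
    e0, e1, e2, e3, e4]
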